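-- pv_equiv track=rewrite | github.com/elliesleightholm/Python | Computational Mathematics Module/Primes & Plots_10.py | sgprimes
-- ===== SOURCE A (Python) =====
-- def primelist(n):
--     primes = list(range(2,n+1))
--     for i in primes:
--         j=2
--         while i*j<= primes[-1]:
--             if i*j in primes:
--                 primes.remove(i*j)
--             j=j+1
--     return primes
--
-- def sgprimes(n):
--     mylist=[]
--     primes = list(range(2,n+1))
--     for i in primes:
--         j=2
--         while i*j<= primes[-1]:
--             if i*j in primes:
--                 primes.remove(i*j)
--             j=j+1
--     germain = primes
--     for k in germain:
--         if (2*k) + 1 in primelist(2*n +1):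
--             mylist.append(k)
--     return mylist
-- ===== SOURCE B (Python) =====
-- def sgprimes(n):
--     def has_no_divisor(k):
--         return all(k % d != 0 for d in range(2, k))
--     return [k for k in range(2, n + 1) if has_no_divisor(k) and has_no_divisor(2 * k + 1)]
-- ===== Notes on version B (the rewrite author's own statement) =====
-- stated objective: faster
-- what changed: A sieves [2..n] by repeated in-place list removal and, for every surviving prime, rebuilds the whole prime list up to 2n+1 again to test membership of 2p+1; B is a single comprehension that tests p and 2p+1 directly by trial division, with no list mutation and no recomputation.
import Mathlib
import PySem

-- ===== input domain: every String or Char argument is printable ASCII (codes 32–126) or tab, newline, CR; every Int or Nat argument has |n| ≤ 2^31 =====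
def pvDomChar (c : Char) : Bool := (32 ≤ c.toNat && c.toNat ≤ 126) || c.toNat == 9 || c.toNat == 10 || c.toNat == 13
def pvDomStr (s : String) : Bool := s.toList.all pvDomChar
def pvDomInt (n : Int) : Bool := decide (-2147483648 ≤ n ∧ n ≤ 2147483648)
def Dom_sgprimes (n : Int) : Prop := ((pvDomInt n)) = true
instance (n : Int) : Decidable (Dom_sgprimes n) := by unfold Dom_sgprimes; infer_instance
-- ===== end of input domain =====

-- B replaces A's removal-sieve over [2..n] plus a freshly rebuilt prime list up to 2n+1 for
-- every candidate by a single trial-division comprehension (objective: faster).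

-- ===== PORT A =====
-- A's inner `while i*j <= primes[-1]` loop.  `if i*j in primes: primes.remove(i*j)` is the
-- membership-guarded first-occurrence removal, i.e. List.erase (PySem.List.remove?_eq_some_erase);
-- primes[-1] is PySem.List.pyGetD primes (-1) 0 (the default is never read: for the empty list the
-- loop condition i*j ≤ 0 is false since i, j ≥ 2).  fuel only makes the recursion structural; it is
-- chosen large enough below that it never runs out (proved in the lemmas).
def sgRemoveMults (i j : Int) (primes : List Int) (fuel : Nat) : List Int :=
  match fuel with
  | 0 => primes
  | fuel + 1 =>
    if i * j ≤ PySem.List.pyGetD primes (-1) 0 then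
      sgRemoveMults i (j + 1)
        (if i * j ∈ primes then primes.erase (i * j) else primes) fuel
    else primes

-- Python's `for i in primes` over the list it mutates: an internal index that is compared with the
-- CURRENT length each round (pyGet? primes idx = none exactly when the iterator is exhausted).
def sgSieveLoop (primes : List Int) (idx : Nat) (fuel fuelJ : Nat) : List Int :=
  match fuel with
  | 0 => primes
  | fuel + 1 =>
    match PySem.List.pyGet? primes (idx : Int) with
    | none => primes
    | some i => sgSieveLoop (sgRemoveMults i 2 primes fuelJ) (idx + 1) fuel fuelJ

def primelist (n : Int) : List Int :=
  let primes := PySem.List.pyRange 2 (n + 1) 1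
  sgSieveLoop primes 0 primes.length (n + 1).toNat

def sgprimes (n : Int) : List Int :=
  let primes := PySem.List.pyRange 2 (n + 1) 1
  let germain := sgSieveLoop primes 0 primes.length (n + 1).toNat
  germain.foldl
    (fun mylist k => if 2 * k + 1 ∈ primelist (2 * n + 1) then mylist ++ [k] else mylist) []

-- ===== PORT B =====
-- all(k % d != 0 for d in range(2, k))
def hasNoDivisor (k : Int) : Bool :=
  (PySem.List.pyRange 2 k 1).all (fun d => PySem.Int.mod k d != 0)

def sgprimes_alt (n : Int) : List Int :=
  (PySem.List.pyRange 2 (n + 1) 1).filter (fun k => hasNoDivisor k && hasNoDivisor (2 * k + 1))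

-- ===== PRECONDITION & SPEC =====
def Spec_sgprimes (n : Int) (out : List Int) : Prop := out = sgprimes_alt n
instance (n : Int) (out : List Int) : Decidable (Spec_sgprimes n out) := by unfold Spec_sgprimes; infer_instance

-- ===== CLAIM (what is proved, stated in full; the proofs are below) =====
def Claim_equal_sgprimes : Prop := ∀ (n : Int), Dom_sgprimes n → Spec_sgprimes n (sgprimes n)

-- ===== LEMMAS AND PROOFS =====

lemma hasNoDivisor_iff (k : Int) :
    hasNoDivisor k = true ↔ ∀ d : Int, 2 ≤ d → d < k → ¬ d ∣ k := by
  simp [hasNoDivisor, List.all_eq_true, PySem.List.mem_pyRange_one,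
    ← PySem.Int.mod_eq_zero_iff_dvd]

lemma exists_prime_divisor (x : Int) (_hx : 2 ≤ x) (h : hasNoDivisor x = false) :
    ∃ q : Int, 2 ≤ q ∧ q < x ∧ q ∣ x ∧ hasNoDivisor q = true := by
  have h' : ¬ (∀ d : Int, 2 ≤ d → d < x → ¬ d ∣ x) := by
    rw [← hasNoDivisor_iff]; simp [h]
  push Not at h'
  obtain ⟨d, hd2, hdx, hdvd⟩ := h'
  have hP : ∃ m : Nat, 2 ≤ (m : Int) ∧ (m : Int) < x ∧ (m : Int) ∣ x :=
    ⟨d.toNat, by rw [Int.toNat_of_nonneg (by omega)]; exact ⟨hd2, hdx, hdvd⟩⟩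
  classical
  obtain ⟨hq2, hqx, hqd⟩ := Nat.find_spec hP
  refine ⟨(Nat.find hP : Nat), hq2, hqx, hqd, ?_⟩
  rw [hasNoDivisor_iff]
  intro e he2 heq hedvd
  have hlt : e.toNat < Nat.find hP := by omega
  exact Nat.find_min hP hlt (by
    rw [Int.toNat_of_nonneg (by omega)]
    exact ⟨he2, lt_trans heq hqx, dvd_trans hedvd hqd⟩)

lemma sorted_le_of_mem_drop {l : List Int} (h : l.Pairwise (· < ·)) {idx : Nat}
    (hidx : idx < l.length) {x : Int} (hx : x ∈ l.drop idx) : l[idx] ≤ x := by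
  rw [List.mem_iff_getElem] at hx
  obtain ⟨k, hk, rfl⟩ := hx
  rw [List.getElem_drop]
  have hk' : idx + k < l.length := by simp at hk; omega
  rcases Nat.eq_or_lt_of_le (Nat.le_add_right idx k) with heq | hlt
  · have hk0 : k = 0 := by omega
    subst hk0; simp
  · exact le_of_lt (List.pairwise_iff_getElem.mp h idx (idx+k) hidx hk' hlt)

lemma sorted_lt_of_mem_take {l : List Int} (h : l.Pairwise (· < ·)) {idx : Nat}
    (hidx : idx < l.length) {x : Int} (hx : x ∈ l.take idx) : x < l[idx] := by
  rw [List.mem_iff_getElem] at hx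
  obtain ⟨k, hk, rfl⟩ := hx
  simp at hk
  rw [List.getElem_take]
  exact List.pairwise_iff_getElem.mp h k idx (by omega) hidx (by omega)

lemma sgRemoveMults_eq_filter : ∀ (fuel : Nat) (j : Int) (l : List Int) (i : Int),
    2 ≤ i → 2 ≤ j → l.Pairwise (· < ·) → (∀ x ∈ l, 2 ≤ x) →
    (∀ x ∈ l, x < i * j + i * fuel) →
    sgRemoveMults i j l fuel = l.filter (fun x => decide (¬ (i ∣ x ∧ i * j ≤ x))) := by
  intro fuel
  induction fuel with
  | zero =>
    intro j l i hi hj hs hpos hbound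
    rw [sgRemoveMults]
    symm
    rw [List.filter_eq_self]
    intro x hx
    have := hbound x hx
    simp only [decide_eq_true_eq]
    rintro ⟨-, hle⟩
    omega
  | succ fuel ih =>
    intro j l i hi hj hs hpos hbound
    rw [sgRemoveMults]
    split
    · -- i * j ≤ primes[-1]
      rename_i hcond
      have hnd : l.Nodup := List.Pairwise.imp ne_of_lt hs
      have hl' : (if i * j ∈ l then l.erase (i * j) else l)
          = l.filter (fun x => decide (¬ x = i * j)) := by
        split
        · have := List.Nodup.erase_eq_filter hnd (i * j)
          simpa using this
        · rename_i hnm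
          symm; rw [List.filter_eq_self]
          intro x hx
          simp only [decide_eq_true_eq]
          rintro rfl; exact hnm hx
      rw [hl', ih (j+1) _ i hi (by omega)
            (List.Pairwise.filter _ hs)
            (fun x hx => hpos x (List.mem_of_mem_filter hx))
            (fun x hx => by
              have := hbound x (List.mem_of_mem_filter hx)
              have : x < i * j + i * (fuel + 1) := this
              have hexp : i * j + i * ((fuel:Int) + 1) = i * (j + 1) + i * fuel := by ring
              push_cast at this ⊢
              omega),
          List.filter_filter]
      apply List.filter_congr
      intro x hx
      have hx2 : 2 ≤ x := hpos x hx
      rw [← Bool.decide_and, decide_eq_decide]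
      by_cases hd : i ∣ x
      · obtain ⟨m, rfl⟩ := hd
        have hm1 : 1 ≤ m := by nlinarith
        have e1 : (i * m = i * j) ↔ m = j :=
          ⟨fun h => mul_left_cancel₀ (by omega) h, fun h => by rw [h]⟩
        have e2 : (i * (j + 1) ≤ i * m) ↔ j + 1 ≤ m :=
          ⟨fun h => le_of_mul_le_mul_left h (by omega),
           fun h => mul_le_mul_of_nonneg_left h (by omega)⟩
        have e3 : (i * j ≤ i * m) ↔ j ≤ m :=
          ⟨fun h => le_of_mul_le_mul_left h (by omega),
           fun h => mul_le_mul_of_nonneg_left h (by omega)⟩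
        have ed : i ∣ i * m := dvd_mul_right i m
        simp only [e1, e2, e3, ed, true_and]
        omega
      · have hne : ¬ x = i * j := by rintro rfl; exact hd (dvd_mul_right i j)
        tauto
    · -- loop exits: everything still in l is below i*j
      rename_i hcond
      symm; rw [List.filter_eq_self]
      intro x hx
      have hne : l ≠ [] := by rintro rfl; simp at hx
      rw [PySem.List.pyGetD_neg_one l 0 hne] at hcond
      have hlast : x ≤ l.getLast hne := by
        rw [List.getLast_eq_getElem]
        rw [List.mem_iff_getElem] at hx
        obtain ⟨k, hk, rfl⟩ := hx
        rcases Nat.lt_or_ge k (l.length - 1) with hlt | hge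
        · exact le_of_lt (List.pairwise_iff_getElem.mp hs k (l.length - 1) hk (by omega) hlt)
        · have : k = l.length - 1 := by omega
          subst this; simp
      simp only [decide_eq_true_eq]
      rintro ⟨-, hle⟩
      omega

lemma sgSieveLoop_eq_filter : ∀ (fuel : Nat) (l : List Int) (idx fuelJ : Nat),
    l.Pairwise (· < ·) → (∀ x ∈ l, 2 ≤ x) →
    (∀ x ∈ l, x < 4 + 2 * (fuelJ : Int)) →
    (∀ x ∈ l.take idx, hasNoDivisor x = true) →
    (∀ x ∈ l.drop idx, hasNoDivisor x = false →
      ∃ q ∈ l.drop idx, hasNoDivisor q = true ∧ q ∣ x ∧ q < x) →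
    l.length ≤ fuel + idx →
    sgSieveLoop l idx fuel fuelJ = l.filter hasNoDivisor := by
  intro fuel
  induction fuel with
  | zero =>
    intro l idx fuelJ hs hpos hbnd htake hdrop hlen
    rw [sgSieveLoop]
    symm; rw [List.filter_eq_self]
    intro x hx
    exact htake x (by rwa [List.take_of_length_le (by omega)])
  | succ fuel ih =>
    intro l idx fuelJ hs hpos hbnd htake hdrop hlen
    rw [sgSieveLoop]
    cases hget : PySem.List.pyGet? l (idx : Int) with
    | none =>
      have : l.length ≤ idx := by
        rw [PySem.List.pyGet?_natCast] at hget
        simpa [List.getElem?_eq_none_iff] using hget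
      symm; rw [List.filter_eq_self]
      intro x hx
      exact htake x (by rwa [List.take_of_length_le (by omega)])
    | some i =>
      dsimp only
      rw [PySem.List.pyGet?_natCast] at hget
      have hidx : idx < l.length := by
        by_contra hc
        rw [List.getElem?_eq_none_iff.mpr (by omega)] at hget
        simp at hget
      have hi : l[idx] = i := by
        rw [List.getElem?_eq_getElem hidx] at hget
        exact Option.some.inj hget
      have hmem : i ∈ l := hi ▸ List.getElem_mem hidx
      have hi2 : 2 ≤ i := hpos i hmem
      have hdropc : l.drop idx = i :: l.drop (idx + 1) := by
        rw [← hi, List.getElem_cons_drop]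
      -- the element under the iterator has no proper divisor
      have hPri : hasNoDivisor i = true := by
        by_contra hc
        obtain ⟨q, hq, hqP, hqd, hql⟩ :=
          hdrop i (by rw [hdropc]; exact List.mem_cons_self) (by simpa using hc)
        have := sorted_le_of_mem_drop hs hidx hq
        rw [hi] at this
        omega
      -- the inner loop is a filter
      have hrm : sgRemoveMults i 2 l fuelJ
          = l.filter (fun x => decide (¬ (i ∣ x ∧ i * 2 ≤ x))) := by
        apply sgRemoveMults_eq_filter fuelJ 2 l i hi2 (by omega) hs hpos
        intro x hx
        have h1 := hbnd x hx
        have h2 : (2:Int) * fuelJ ≤ i * fuelJ :=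
          mul_le_mul_of_nonneg_right (by omega) (by positivity)
        nlinarith
      rw [hrm]
      set keep : Int → Bool := fun x => decide (¬ (i ∣ x ∧ i * 2 ≤ x)) with hkeep
      -- the first idx elements and i itself all survive the removal
      have hkeep_i : keep i = true := by
        simp only [hkeep, decide_eq_true_eq]
        rintro ⟨-, hle⟩; omega
      have hkeep_take : ∀ x ∈ l.take idx, keep x = true := by
        intro x hx
        have hxi : x < i := hi ▸ sorted_lt_of_mem_take hs hidx hx
        simp only [hkeep, decide_eq_true_eq]
        rintro ⟨hdvd, hle⟩; omega
      -- decomposition of the filtered list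
      have hsplit : l.filter keep
          = l.take idx ++ i :: (l.drop (idx + 1)).filter keep := by
        conv_lhs => rw [← List.take_append_drop idx l]
        rw [List.filter_append, List.filter_eq_self.mpr hkeep_take, hdropc,
          List.filter_cons_of_pos hkeep_i]
      have hlentake : (l.take idx).length = idx := by
        rw [List.length_take]; omega
      have htake' : (l.filter keep).take (idx + 1) = l.take idx ++ [i] := by
        rw [hsplit, List.take_append, hlentake]
        simp
      have hdrop' : (l.filter keep).drop (idx + 1) = (l.drop (idx + 1)).filter keep := by
        rw [hsplit, List.drop_append, hlentake]
        simp
      -- the recursive call: establish the invariant for the filtered list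
      rw [ih (l.filter keep) (idx + 1) fuelJ
            (List.Pairwise.filter _ hs)
            (fun x hx => hpos x (List.mem_of_mem_filter hx))
            (fun x hx => hbnd x (List.mem_of_mem_filter hx))
            (by
              rw [htake']
              intro x hx
              rcases List.mem_append.mp hx with hx | hx
              · exact htake x hx
              · rwa [List.mem_singleton.mp hx])
            (by
              rw [hdrop']
              intro x hx hxP
              have hxT : x ∈ l.drop (idx + 1) := List.mem_of_mem_filter hx
              have hxD : x ∈ l.drop idx := by rw [hdropc]; exact List.mem_cons_of_mem _ hxT
              obtain ⟨q, hq, hqP, hqd, hql⟩ := hdrop x hxD hxP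
              rw [hdropc] at hq
              have hkx : keep x = true := List.of_mem_filter hx
              rcases List.mem_cons.mp hq with rfl | hqT
              · -- q = i would mean x is a removed multiple of i
                exfalso
                simp only [hkeep, decide_eq_true_eq] at hkx
                obtain ⟨m, rfl⟩ := hqd
                have hm2 : 2 ≤ m := by nlinarith
                exact hkx ⟨dvd_mul_right q m, by nlinarith⟩
              · refine ⟨q, List.mem_filter.mpr ⟨hqT, ?_⟩, hqP, hqd, hql⟩
                simp only [hkeep, decide_eq_true_eq]
                rintro ⟨hdvd, hle⟩
                rw [hasNoDivisor_iff] at hqP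
                exact hqP i hi2 (by omega) hdvd)
            (by
              have := List.length_filter_le keep l
              omega)]
      -- collapse the two filters
      rw [List.filter_filter]
      apply List.filter_congr
      intro x hx
      by_cases hPx : hasNoDivisor x = true
      · have hkx : keep x = true := by
          simp only [hkeep, decide_eq_true_eq]
          rintro ⟨hdvd, hle⟩
          rw [hasNoDivisor_iff] at hPx
          exact hPx i hi2 (by omega) hdvd
        rw [hPx]
        simp [hkx]
      · simp at hPx
        rw [hPx]
        simp

lemma sieve_range_eq_filter (m : Int) :
    sgSieveLoop (PySem.List.pyRange 2 (m + 1) 1) 0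
        (PySem.List.pyRange 2 (m + 1) 1).length (m + 1).toNat
      = (PySem.List.pyRange 2 (m + 1) 1).filter hasNoDivisor := by
  apply sgSieveLoop_eq_filter
  · exact PySem.List.pairwise_lt_pyRange_one 2 (m + 1)
  · intro x hx
    exact (PySem.List.mem_pyRange_one.mp hx).1
  · intro x hx
    obtain ⟨h1, h2⟩ := PySem.List.mem_pyRange_one.mp hx
    have : ((m + 1).toNat : Int) = max (m + 1) 0 := Int.toNat_eq_max (m + 1)
    omega
  · intro x hx
    simp at hx
  · intro x hx hxP
    rw [List.drop_zero] at hx ⊢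
    obtain ⟨h1, h2⟩ := PySem.List.mem_pyRange_one.mp hx
    obtain ⟨q, hq2, hqx, hqd, hqP⟩ := exists_prime_divisor x h1 hxP
    exact ⟨q, PySem.List.mem_pyRange_one.mpr ⟨hq2, by omega⟩, hqP, hqd, hqx⟩
  · omega

lemma primelist_eq (m : Int) :
    primelist m = (PySem.List.pyRange 2 (m + 1) 1).filter hasNoDivisor := by
  simpa [primelist] using sieve_range_eq_filter m

lemma sgprimes_eq_alt (n : Int) : sgprimes n = sgprimes_alt n := by
  have hrfl : sgprimes n
      = (sgSieveLoop (PySem.List.pyRange 2 (n + 1) 1) 0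
          (PySem.List.pyRange 2 (n + 1) 1).length (n + 1).toNat).foldl
          (fun mylist k => if 2 * k + 1 ∈ primelist (2 * n + 1) then mylist ++ [k] else mylist)
          [] := rfl
  rw [hrfl, sgprimes_alt, sieve_range_eq_filter n]
  rw [PySem.List.foldl_append_ite_eq_filter]
  rw [List.nil_append, List.filter_filter]
  apply List.filter_congr
  intro x hx
  obtain ⟨h1, h2⟩ := PySem.List.mem_pyRange_one.mp hx
  have hmem : decide (2 * x + 1 ∈ primelist (2 * n + 1)) = hasNoDivisor (2 * x + 1) := by
    rw [primelist_eq]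
    by_cases hp : hasNoDivisor (2 * x + 1) = true
    · rw [hp]
      apply decide_eq_true
      exact List.mem_filter.mpr ⟨PySem.List.mem_pyRange_one.mpr ⟨by omega, by omega⟩, hp⟩
    · simp only [Bool.not_eq_true] at hp
      rw [hp]
      simp only [decide_eq_false_iff_not, List.mem_filter]
      rintro ⟨-, hc⟩
      rw [hp] at hc
      exact Bool.false_ne_true hc
  rw [hmem, Bool.and_comm]

-- ===== VERDICT (by name: the statement is the Claim_ definition above) =====
theorem sgprimes_spec : Claim_equal_sgprimes := by
  intro n _
  unfold Spec_sgprimes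
  exact sgprimes_eq_alt n
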